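-- pv_equiv track=rewrite | github.com/coolplayagent/relay-teams | src/relay_teams/mcp/config_reload_service.py | _resolve_uv_tool_package
-- ===== SOURCE A (Python) =====
-- def _resolve_uv_tool_package(args: tuple[str, ...]) -> str | None:
--     for arg in args:
--         if arg.startswith("--from="):
--             resolved = arg.partition("=")[2].strip()
--             return resolved or None
--     for index, arg in enumerate(args):
--         if arg != "--from":
--             continue
--         next_index = index + 1
--         if next_index >= len(args):
--             return None
--         resolved = args[next_index].strip()
--         return resolved or None
--     if not args:
--         return None
--     first_arg = args[0].strip()
--     if not first_arg or first_arg.startswith("-"):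
--         return None
--     return first_arg
-- ===== SOURCE B (Python) =====
-- def _resolve_uv_tool_package(args):
--     from_index = None
--     for index, arg in enumerate(args):
--         if arg.startswith("--from="):
--             resolved = arg[len("--from="):].strip()
--             return resolved or None
--         if from_index is None and arg == "--from":
--             from_index = index
--     if from_index is not None:
--         next_index = from_index + 1
--         if next_index >= len(args):
--             return None
--         resolved = args[next_index].strip()
--         return resolved or None
--     if not args:
--         return None
--     first_arg = args[0].strip()
--     if not first_arg or first_arg.startswith("-"):
--         return None
--     return first_arg
-- ===== Notes on version B (the rewrite author's own statement) =====
-- stated objective: simpler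
-- what changed: Replaces A's two sequential scans (one for '--from=', a second enumerate scan for a bare '--from') by a single pass that returns on the first '--from=' and records the index of the first bare '--from' for the post-loop logic.
import Mathlib
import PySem

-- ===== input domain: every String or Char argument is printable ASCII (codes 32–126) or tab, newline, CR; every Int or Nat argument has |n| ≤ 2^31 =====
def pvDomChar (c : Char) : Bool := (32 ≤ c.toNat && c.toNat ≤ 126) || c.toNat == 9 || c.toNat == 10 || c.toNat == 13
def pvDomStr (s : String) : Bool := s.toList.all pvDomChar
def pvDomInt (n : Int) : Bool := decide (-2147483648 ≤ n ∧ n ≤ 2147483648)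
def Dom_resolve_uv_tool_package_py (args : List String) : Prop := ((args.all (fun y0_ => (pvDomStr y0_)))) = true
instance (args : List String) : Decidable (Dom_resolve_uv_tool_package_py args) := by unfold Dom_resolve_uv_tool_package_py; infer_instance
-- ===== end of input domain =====

-- B replaces A's two sequential scans (first for "--from=", then for a bare "--from")
-- by one pass that records the first bare "--from" index; objective: simpler (single traversal).


-- ===== PORT A =====
-- arg.partition("=")[2] for the one-char separator "=": everything after the first '='
-- (empty if absent) — hand port, exact for this call.
def pvPartAfterEq : List Char → List Char
  | [] => []
  | c :: t => if c = '=' then t else pvPartAfterEq t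

-- first loop of A: 'for arg in args: if arg.startswith("--from="): return …'
def pvALoop1 : List String → Option (Option String)
  | [] => none
  | a :: t =>
    if PySem.Str.startswith a "--from=" then
      let resolved := PySem.Str.strip (String.mk (pvPartAfterEq a.toList))
      some (if resolved = "" then none else some resolved)
    else pvALoop1 t

-- second loop of A: 'for index, arg in enumerate(args): …'
def pvALoop2 (full : List String) : List (Int × String) → Option (Option String)
  | [] => none
  | (index, arg) :: t =>
    if arg ≠ "--from" then pvALoop2 full t
    else
      let nextIndex := index + 1
      if (full.length : Int) ≤ nextIndex then some none
      else
        let resolved := PySem.Str.strip (PySem.List.pyGetD full nextIndex "")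
        some (if resolved = "" then none else some resolved)

def resolve_uv_tool_package_py (args : List String) : Option String :=
  match pvALoop1 args with
  | some r => r
  | none =>
  match pvALoop2 args (PySem.List.enumerate args 0) with
  | some r => r
  | none =>
  match args with
  | [] => none
  | a0 :: _ =>
    let firstArg := PySem.Str.strip a0
    if firstArg = "" || PySem.Str.startswith firstArg "-" then none else some firstArg

-- ===== PORT B =====
-- single pass with a recorded first bare '--from' index (Source B's loop), then Source B's tail logic
def pvBLoop (full : List String) : List String → Nat → Option Nat → Option String
  | [], _, fromIdx =>
    (match fromIdx with
     | some i =>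
       if full.length ≤ i + 1 then none
       else
         let resolved := PySem.Str.strip (full.getD (i + 1) "")
         if resolved = "" then none else some resolved
     | none =>
       match full with
       | [] => none
       | a0 :: _ =>
         let firstArg := PySem.Str.strip a0
         if firstArg = "" || PySem.Str.startswith firstArg "-" then none else some firstArg)
  | a :: t, idx, fromIdx =>
    if PySem.Str.startswith a "--from=" then
      let resolved := PySem.Str.strip (String.mk (a.toList.drop 7))   -- arg[len("--from="):]
      if resolved = "" then none else some resolved
    else
      pvBLoop full t (idx + 1) (if fromIdx = none ∧ a = "--from" then some idx else fromIdx)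

def resolve_uv_tool_package_py_alt (args : List String) : Option String :=
  pvBLoop args args 0 none

-- ===== PRECONDITION & SPEC =====
def Spec_resolve_uv_tool_package_py (args : List String) (out : Option String) : Prop := out = resolve_uv_tool_package_py_alt args
instance (args : List String) (out : Option String) : Decidable (Spec_resolve_uv_tool_package_py args out) := by unfold Spec_resolve_uv_tool_package_py; infer_instance

-- ===== CLAIM (what is proved, stated in full; the proofs are below) =====
def Claim_equal_resolve_uv_tool_package_py : Prop := ∀ (args : List String), Dom_resolve_uv_tool_package_py args → Spec_resolve_uv_tool_package_py args (resolve_uv_tool_package_py args)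

-- ===== LEMMAS AND PROOFS =====

-- on an argument that starts with "--from=", A's partition tail equals B's drop 7
theorem pvPartAfterEq_of_startswith (a : String)
    (h : PySem.Str.startswith a "--from=" = true) :
    pvPartAfterEq a.toList = a.toList.drop 7 := by
  have h' : ("--from=".toList) <+: a.toList := by
    have := (PySem.Chars.startswith_iff a.toList "--from=".toList).1 (by simpa using h)
    exact this
  obtain ⟨rest, hr⟩ := h'
  rw [← hr]
  simp [pvPartAfterEq]

-- main invariant: B's one pass equals A's remaining work
theorem pvLoop_equiv (rem : List String) : ∀ (full : List String) (idx : Nat) (fi : Option Nat),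
    pvBLoop full rem idx fi
    = (match pvALoop1 rem with
       | some r => r
       | none =>
         match fi with
         | some i =>
           if full.length ≤ i + 1 then none
           else
             let resolved := PySem.Str.strip (full.getD (i + 1) "")
             if resolved = "" then none else some resolved
         | none =>
           match pvALoop2 full (PySem.List.enumerate rem (idx : Int)) with
           | some r => r
           | none =>
             match full with
             | [] => none
             | a0 :: _ =>
               let firstArg := PySem.Str.strip a0
               if firstArg = "" || PySem.Str.startswith firstArg "-" then none
               else some firstArg) := by
  induction rem with
  | nil =>
    intro full idx fi
    cases fi <;> simp [pvBLoop, pvALoop1, pvALoop2, PySem.List.enumerate_nil]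
  | cons a t ih =>
    intro full idx fi
    by_cases h1 : PySem.Str.startswith a "--from=" = true
    · have h1' : PySem.Chars.startswith a.toList ['-', '-', 'f', 'r', 'o', 'm', '='] = true := by
        simpa using h1
      simp [pvBLoop, pvALoop1, h1', pvPartAfterEq_of_startswith a h1]
    · have h1' : PySem.Chars.startswith a.toList ['-', '-', 'f', 'r', 'o', 'm', '='] = false := by
        simpa using h1
      cases fi with
      | some i =>
        simp [pvBLoop, pvALoop1, h1', ih full (idx + 1) (some i)]
      | none =>
        by_cases h2 : a = "--from"
        · subst h2
          have hget : PySem.List.pyGetD full ((idx : Int) + 1) "" = full.getD (idx + 1) "" := by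
            rw [show ((idx : Int) + 1) = (((idx + 1 : Nat)) : Int) by push_cast; ring,
              PySem.List.pyGetD_natCast]
          show pvBLoop full ("--from" :: t) idx none = _
          rw [pvBLoop, if_neg h1, if_pos ⟨rfl, rfl⟩, ih full (idx + 1) (some idx)]
          conv_rhs => rw [pvALoop1, if_neg h1, PySem.List.enumerate_cons,
            pvALoop2, if_neg (show ¬(("--from" : String) ≠ "--from") by simp)]
          cases hA : pvALoop1 t with
          | some r => rfl
          | none =>
            by_cases hlen : full.length ≤ idx + 1
            · have hlen' : (full.length : Int) ≤ (idx : Int) + 1 := by exact_mod_cast hlen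
              simp only [if_pos hlen, if_pos hlen']
            · have hlen' : ¬ (full.length : Int) ≤ (idx : Int) + 1 := by exact_mod_cast hlen
              simp only [if_neg hlen, if_neg hlen', hget]
        · simp [pvBLoop, pvALoop1, h1', h2, ih full (idx + 1) none,
            PySem.List.enumerate_cons, pvALoop2]

-- ===== VERDICT (by name: the statement is the Claim_ definition above) =====
theorem resolve_uv_tool_package_py_spec : Claim_equal_resolve_uv_tool_package_py := by
  intro args _
  unfold Spec_resolve_uv_tool_package_py resolve_uv_tool_package_py resolve_uv_tool_package_py_alt
  rw [pvLoop_equiv args args 0 none]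
  simp
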